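-- pv_equiv track=rewrite | github.com/okanasl/MicroBoiler | src/modules/templating/templating.py | filter_region
-- ===== SOURCE A (Python) =====
-- def filter_region(file, start_delete_key, stop_delete_key):
--     """
--     Given a file handle, generate all lines except those between the specified
--     regions.
--     """
--     lines = iter(file)
--     try:
--         while True:
--             line = next(lines)
--             if start_delete_key in line and ':all' not in line:
--                 # Discard all lines up to and including the stop marker
--                 while stop_delete_key not in line:
--                     line = next(lines)
--                 line = next(lines)
--             yield line
--     except StopIteration:
--         return
-- ===== SOURCE B (Python) =====
-- def filter_region(file, start_delete_key, stop_delete_key):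
--     """
--     Yield all lines except those inside delete regions, as a single
--     flag-driven loop: NORMAL (0) yields lines and detects a start marker,
--     SKIPPING (1) drops lines until the stop marker, PASS_ONE (2) yields
--     the line right after the stop marker unconditionally.
--     """
--     state = 0
--     for line in file:
--         if state == 0:
--             if start_delete_key in line and ':all' not in line:
--                 state = 2 if stop_delete_key in line else 1
--             else:
--                 yield line
--         elif state == 1:
--             if stop_delete_key in line:
--                 state = 2
--         else:
--             yield line
--             state = 0
-- ===== Notes on version B (the rewrite author's own statement) =====
-- stated objective: simpler
-- what changed: Replaced the nested next()/StopIteration iterator-driven loops with a single for-loop over the lines carrying a three-valued state flag (normal / skipping / pass-one).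
import Mathlib
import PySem

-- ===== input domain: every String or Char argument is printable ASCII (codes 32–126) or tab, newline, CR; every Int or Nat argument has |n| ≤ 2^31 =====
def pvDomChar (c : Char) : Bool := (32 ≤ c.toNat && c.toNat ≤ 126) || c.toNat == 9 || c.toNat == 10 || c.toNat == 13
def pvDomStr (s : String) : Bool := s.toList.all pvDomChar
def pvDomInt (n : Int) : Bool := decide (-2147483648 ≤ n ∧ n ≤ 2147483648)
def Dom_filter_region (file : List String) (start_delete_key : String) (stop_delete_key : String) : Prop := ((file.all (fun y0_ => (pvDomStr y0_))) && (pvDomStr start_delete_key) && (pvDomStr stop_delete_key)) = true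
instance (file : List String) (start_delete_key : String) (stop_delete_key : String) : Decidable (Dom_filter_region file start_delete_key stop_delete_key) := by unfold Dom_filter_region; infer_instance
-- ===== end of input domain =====

-- B replaces A's nested next()/StopIteration iterator loops with one pass carrying a
-- three-valued state flag (normal / skipping / pass-one); same output, different decomposition.


-- ===== PORT A =====
-- inner 'while stop_delete_key not in line: line = next(lines)' followed by 'line = next(lines)':
-- returns the line after the stop marker together with the remaining lines, or none on StopIteration.
def skipLoopA (stop_delete_key : String) (line : String) (rest : List String) :
    Option (String × List String) :=
  if PySem.Str.isIn stop_delete_key line then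
    match rest with
    | [] => none
    | l :: r => some (l, r)
  else
    match rest with
    | [] => none
    | l :: r => skipLoopA stop_delete_key l r

lemma skipLoopA_length {stop_delete_key : String} :
    ∀ (line : String) (rest : List String) (l' : String) (r' : List String),
      skipLoopA stop_delete_key line rest = some (l', r') → r'.length < rest.length := by
  intro line rest
  induction rest generalizing line with
  | nil => intro l' r' h; unfold skipLoopA at h; split at h <;> simp at h
  | cons l r ih =>
    intro l' r' h
    unfold skipLoopA at h
    split at h
    · simp at h; simp [h.2]
    · exact Nat.lt_trans (ih l l' r' h) (by simp)

-- outer generator loop of A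
def filter_region (file : List String) (start_delete_key : String) (stop_delete_key : String) : List String :=
  match file with
  | [] => []
  | line :: rest =>
    if PySem.Str.isIn start_delete_key line ∧ ¬ PySem.Str.isIn ":all" line then
      match h : skipLoopA stop_delete_key line rest with
      | none => []
      | some (l', r') => l' :: filter_region r' start_delete_key stop_delete_key
    else
      line :: filter_region rest start_delete_key stop_delete_key
termination_by file.length
decreasing_by
  · exact Nat.lt_succ_of_lt (skipLoopA_length line rest l' r' h)
  · simp

-- ===== PORT B =====
-- one fold over the lines with state 0 = NORMAL, 1 = SKIPPING, 2 = PASS_ONE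
def filter_region_alt (file : List String) (start_delete_key : String) (stop_delete_key : String) : List String :=
  (file.foldl
    (fun (p : List String × Nat) line =>
      if p.2 = 0 then
        if PySem.Str.isIn start_delete_key line ∧ ¬ PySem.Str.isIn ":all" line then
          (p.1, if PySem.Str.isIn stop_delete_key line then 2 else 1)
        else (p.1 ++ [line], 0)
      else if p.2 = 1 then
        (p.1, if PySem.Str.isIn stop_delete_key line then 2 else 1)
      else (p.1 ++ [line], 0))
    ([], 0)).1
-- ===== PRECONDITION & SPEC =====
def Spec_filter_region (file : List String) (start_delete_key : String) (stop_delete_key : String) (out : List String) : Prop := out = filter_region_alt file start_delete_key stop_delete_key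
instance (file : List String) (start_delete_key : String) (stop_delete_key : String) (out : List String) : Decidable (Spec_filter_region file start_delete_key stop_delete_key out) := by unfold Spec_filter_region; infer_instance

-- ===== CLAIM (what is proved, stated in full; the proofs are below) =====
def Claim_equal_filter_region : Prop := ∀ (file : List String) (start_delete_key : String) (stop_delete_key : String), Dom_filter_region file start_delete_key stop_delete_key → Spec_filter_region file start_delete_key stop_delete_key (filter_region file start_delete_key stop_delete_key)

-- ===== LEMMAS AND PROOFS =====

-- B's state machine, written as structural recursion (proof device only)
def gB (start_delete_key stop_delete_key : String) : Nat → List String → List String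
  | _, [] => []
  | 0, line :: rest =>
    if PySem.Str.isIn start_delete_key line ∧ ¬ PySem.Str.isIn ":all" line then
      gB start_delete_key stop_delete_key
        (if PySem.Str.isIn stop_delete_key line then 2 else 1) rest
    else line :: gB start_delete_key stop_delete_key 0 rest
  | 1, line :: rest =>
    gB start_delete_key stop_delete_key
      (if PySem.Str.isIn stop_delete_key line then 2 else 1) rest
  | _ + 2, line :: rest => line :: gB start_delete_key stop_delete_key 0 rest

lemma foldl_gB (s t : String) :
    ∀ (xs : List String) (acc : List String) (st : Nat),
      (xs.foldl
        (fun (p : List String × Nat) line =>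
          if p.2 = 0 then
            if PySem.Str.isIn s line ∧ ¬ PySem.Str.isIn ":all" line then
              (p.1, if PySem.Str.isIn t line then 2 else 1)
            else (p.1 ++ [line], 0)
          else if p.2 = 1 then
            (p.1, if PySem.Str.isIn t line then 2 else 1)
          else (p.1 ++ [line], 0))
        (acc, st)).1 = acc ++ gB s t st xs := by
  intro xs
  induction xs with
  | nil => intro acc st; simp [gB]
  | cons line rest ih =>
    intro acc st
    match st with
    | 0 =>
      by_cases h : PySem.Str.isIn s line ∧ ¬ PySem.Str.isIn ":all" line
      · have hg : gB s t 0 (line :: rest) =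
            gB s t (if PySem.Str.isIn t line then 2 else 1) rest := by
          simp only [gB]; rw [if_pos h]
        rw [List.foldl_cons, hg,
          if_pos (show ((acc, (0 : Nat)) : List String × Nat).2 = 0 from rfl), if_pos h]
        exact ih acc (if PySem.Str.isIn t line then 2 else 1)
      · have hg : gB s t 0 (line :: rest) = line :: gB s t 0 rest := by
          simp only [gB]; rw [if_neg h]
        rw [List.foldl_cons, hg,
          if_pos (show ((acc, (0 : Nat)) : List String × Nat).2 = 0 from rfl), if_neg h]
        have h2 := ih (acc ++ [line]) 0
        rw [List.append_assoc] at h2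
        exact h2.trans (by simp)
    | 1 =>
      rw [List.foldl_cons,
        if_neg (show ¬ ((acc, (1 : Nat)) : List String × Nat).2 = 0 by simp),
        if_pos (show ((acc, (1 : Nat)) : List String × Nat).2 = 1 from rfl)]
      exact (ih acc _).trans (by simp [gB])
    | n + 2 =>
      rw [List.foldl_cons,
        if_neg (show ¬ ((acc, (n + 2 : Nat)) : List String × Nat).2 = 0 by simp),
        if_neg (show ¬ ((acc, (n + 2 : Nat)) : List String × Nat).2 = 1 by simp)]
      have h2 := ih (acc ++ [line]) 0
      rw [List.append_assoc] at h2
      exact h2.trans (by simp [gB])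

lemma alt_eq_gB (file : List String) (s t : String) :
    filter_region_alt file s t = gB s t 0 file := by
  unfold filter_region_alt
  simpa using foldl_gB s t file [] 0

-- the inner skip loop of A agrees with gB in states 1/2
lemma skip_eq_gB (s t : String) :
    ∀ (rest : List String),
      (∀ r' : List String, r'.length < rest.length → filter_region r' s t = gB s t 0 r') →
      ∀ line : String,
        (match skipLoopA t line rest with
         | none => ([] : List String)
         | some (l', r') => l' :: filter_region r' s t) =
        gB s t (if PySem.Str.isIn t line then 2 else 1) rest := by
  intro rest
  induction rest with
  | nil =>
    intro _ line
    unfold skipLoopA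
    by_cases h : PySem.Str.isIn t line <;> simp [h, gB]
  | cons l r ih =>
    intro H line
    by_cases h : PySem.Str.isIn t line
    · simp only [skipLoopA, if_pos h, gB]
      rw [H r (by simp)]
    · simp only [skipLoopA, if_neg h, gB]
      exact ih (fun r' hr' => H r' (Nat.lt_trans hr' (by simp))) l

lemma main_eq (s t : String) :
    ∀ (n : Nat) (file : List String), file.length ≤ n →
      filter_region file s t = gB s t 0 file := by
  intro n
  induction n with
  | zero =>
    intro file hf
    match file with
    | [] => simp [filter_region, gB]
    | _ :: _ => simp at hf
  | succ n ih =>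
    intro file hf
    match file with
    | [] => simp [filter_region, gB]
    | line :: rest =>
      have hrest : rest.length ≤ n := by simp at hf; omega
      unfold filter_region
      by_cases h : PySem.Str.isIn s line ∧ ¬ PySem.Str.isIn ":all" line
      · rw [if_pos h]
        have H : ∀ r' : List String, r'.length < rest.length →
            filter_region r' s t = gB s t 0 r' :=
          fun r' hr' => ih r' (Nat.le_trans (Nat.le_of_lt hr') hrest)
        have hg : gB s t 0 (line :: rest) =
            gB s t (if PySem.Str.isIn t line then 2 else 1) rest := by
          simp only [gB]; rw [if_pos h]
        rw [hg, ← skip_eq_gB s t rest H line]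
        cases hsk : skipLoopA t line rest with
        | none => simp
        | some p => cases p; simp
      · rw [if_neg h]
        have hg : gB s t 0 (line :: rest) = line :: gB s t 0 rest := by
          simp only [gB]; rw [if_neg h]
        rw [hg, ih rest hrest]

-- ===== VERDICT (by name: the statement is the Claim_ definition above) =====
theorem filter_region_spec : Claim_equal_filter_region := by
  intro file s t _
  unfold Spec_filter_region
  rw [alt_eq_gB, main_eq s t file.length file le_rfl]
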